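-- pv_equiv track=rewrite | github.com/EnzoZafra/Leetcoding | storage-optimization.py | get_max_dist
-- ===== SOURCE A (Python) =====
-- def get_max_dist(bars):
--     maxCut = 0
--     count = 0
--     for has_bar in bars:
--         # if there is a bar, see if the size of the hole is bigger than the max
--         if has_bar:
--             maxCut = max(maxCut, count)
--             count = 1
--         else:
--             count += 1
--
--     # do another max because we might encounter a case where the last bar is cut and we never max
--     maxCut = max(maxCut, count)
--
--     return maxCut
-- ===== SOURCE B (Python) =====
-- def get_max_dist(bars):
--     n = len(bars)
--     idx = [i for i, b in enumerate(bars) if b]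
--     if not idx:
--         return n
--     best = idx[0]
--     for i, j in zip(idx, idx[1:]):
--         best = max(best, j - i)
--     return max(best, n - idx[-1])
-- ===== Notes on version B (the rewrite author's own statement) =====
-- stated objective: alternative
-- what changed: Replaces the incremental scan with running max/count state by an index table (positions of truthy bars) plus a pass over consecutive index gaps, with the leading and trailing runs handled as explicit terms.
import Mathlib
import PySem

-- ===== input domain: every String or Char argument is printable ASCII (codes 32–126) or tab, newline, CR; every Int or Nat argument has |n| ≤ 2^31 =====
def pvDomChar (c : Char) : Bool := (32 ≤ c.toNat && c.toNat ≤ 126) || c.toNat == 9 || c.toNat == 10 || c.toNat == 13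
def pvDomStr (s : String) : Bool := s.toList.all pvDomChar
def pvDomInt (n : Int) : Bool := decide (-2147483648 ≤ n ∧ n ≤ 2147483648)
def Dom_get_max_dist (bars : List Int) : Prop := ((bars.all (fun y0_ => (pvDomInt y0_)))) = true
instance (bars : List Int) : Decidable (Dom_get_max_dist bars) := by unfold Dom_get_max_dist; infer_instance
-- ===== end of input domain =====

-- B replaces A's incremental scan by an index table of bar positions plus a pass over consecutive gaps.
-- ===== PORT A =====
def get_max_dist (bars : List Int) : Int :=
  -- literal transliteration of A: fold carrying (maxCut, count); `if has_bar` is int truthiness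
  let st := bars.foldl (fun (st : Int × Int) has_bar =>
      if has_bar != 0 then (max st.1 st.2, 1) else (st.1, st.2 + 1)) ((0 : Int), (0 : Int))
  max st.1 st.2

-- ===== PORT B =====
def get_max_dist_alt (bars : List Int) : Int :=
  let idx := ((PySem.List.enumerate bars).filter (fun p => p.2 != 0)).map (fun p => p.1)
  match idx with
  | [] => (bars.length : Int)
  | i0 :: rest =>
      let best := ((i0 :: rest).zip rest).foldl (fun b p => max b (p.2 - p.1)) i0
      -- idx[-1]: in this branch idx is nonempty, so Python's idx[-1] is getLast?.getD
      max best ((bars.length : Int) - ((i0 :: rest).getLast?.getD 0))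

-- ===== PRECONDITION & SPEC =====
def Spec_get_max_dist (bars : List Int) (out : Int) : Prop := out = get_max_dist_alt bars
instance (bars : List Int) (out : Int) : Decidable (Spec_get_max_dist bars out) := by unfold Spec_get_max_dist; infer_instance

-- ===== CLAIM (what is proved, stated in full; the proofs are below) =====
def Claim_equal_get_max_dist : Prop := ∀ (bars : List Int), Dom_get_max_dist bars → Spec_get_max_dist bars (get_max_dist bars)

-- ===== LEMMAS AND PROOFS =====

-- index table with an arbitrary start offset (proof helper)
def pvIdx (s : Int) (bars : List Int) : List Int :=
  ((PySem.List.enumerate bars s).filter (fun p => p.2 != 0)).map (fun p => p.1)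

-- A's scan as structural recursion over the list
def pvG (c : Int) (bars : List Int) : Int :=
  match bars with
  | [] => c
  | b :: t => if b != 0 then max c (pvG 1 t) else pvG (c + 1) t

-- B's computation over an index list starting at offset s, with right end m
def pvH (c s m : Int) (I : List Int) : Int :=
  match I with
  | [] => c + (m - s)
  | i0 :: rest =>
      max (((i0 :: rest).zip rest).foldl (fun b p => max b (p.2 - p.1)) (c + (i0 - s)))
          (m - ((i0 :: rest).getLast?.getD 0))

lemma pvA_fold (bars : List Int) : ∀ (m c : Int),
    max (bars.foldl (fun (st : Int × Int) has_bar =>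
        if has_bar != 0 then (max st.1 st.2, 1) else (st.1, st.2 + 1)) (m, c)).1
      (bars.foldl (fun (st : Int × Int) has_bar =>
        if has_bar != 0 then (max st.1 st.2, 1) else (st.1, st.2 + 1)) (m, c)).2
      = max m (pvG c bars) := by
  induction bars with
  | nil => intro m c; simp [pvG]
  | cons b t ih =>
    intro m c
    by_cases hb : b = 0
    · simp only [List.foldl_cons]
      rw [if_neg (by simp [hb]), show pvG c (b :: t) = pvG (c + 1) t from by simp [pvG, hb]]
      exact ih m (c + 1)
    · simp only [List.foldl_cons]
      rw [if_pos (by simp [hb]), show pvG c (b :: t) = max c (pvG 1 t) from by simp [pvG, hb],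
        ih (max m c) 1, max_assoc]

lemma pvIdx_cons_pos (s : Int) (b : Int) (t : List Int) (hb : ¬ b = 0) :
    pvIdx s (b :: t) = s :: pvIdx (s + 1) t := by
  simp [pvIdx, PySem.List.enumerate_cons, hb]

lemma pvIdx_cons_neg (s : Int) (b : Int) (t : List Int) (hb : b = 0) :
    pvIdx s (b :: t) = pvIdx (s + 1) t := by
  simp [pvIdx, PySem.List.enumerate_cons, hb]

lemma pvPullMax (l : List (Int × Int)) : ∀ (c a : Int),
    l.foldl (fun b p => max b (p.2 - p.1)) (max c a)
      = max c (l.foldl (fun b p => max b (p.2 - p.1)) a) := by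
  induction l with
  | nil => intro c a; simp
  | cons p l ih => intro c a; simp [List.foldl_cons, max_assoc, ih]

lemma pvFold_congr (l : List (Int × Int)) {a a' : Int} (h : a = a') :
    l.foldl (fun b p => max b (p.2 - p.1)) a = l.foldl (fun b p => max b (p.2 - p.1)) a' := by
  rw [h]

lemma pvMain (bars : List Int) : ∀ (c s : Int),
    pvG c bars = pvH c s (s + bars.length) (pvIdx s bars) := by
  induction bars with
  | nil => intro c s; simp [pvG, pvIdx, pvH, PySem.List.enumerate_nil]
  | cons b t ih =>
    intro c s
    by_cases hb : b = 0
    · rw [pvIdx_cons_neg s b t hb,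
        show pvG c (b :: t) = pvG (c + 1) t from by simp [pvG, hb],
        ih (c + 1) (s + 1)]
      rcases hJ : pvIdx (s + 1) t with _ | ⟨j0, J⟩
      · simp only [pvH, List.length_cons]; push_cast; ring
      · simp only [pvH, List.length_cons]
        have h1 : c + (j0 - s) = c + 1 + (j0 - (s + 1)) := by ring
        have h4 : s + (((t.length : Int)) + 1) = s + 1 + (t.length : Int) := by ring
        rw [pvFold_congr _ h1]
        push_cast
        rw [h4]
    · rw [pvIdx_cons_pos s b t hb,
        show pvG c (b :: t) = max c (pvG 1 t) from by simp [pvG, hb],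
        ih 1 (s + 1)]
      rcases hJ : pvIdx (s + 1) t with _ | ⟨j0, J⟩
      · simp only [pvH, List.zip_nil_right, List.foldl_nil, List.getLast?_singleton,
          Option.getD_some, List.length_cons]
        push_cast
        simp only [max_def]
        split_ifs <;> omega
      · simp only [pvH, List.length_cons]
        rw [List.zip_cons_cons]
        simp only [List.foldl_cons]
        have h1 : max (c + (s - s)) (j0 - s) = max c (j0 - s) := by
          have hc : c + (s - s) = c := by ring
          rw [hc]
        rw [h1, pvPullMax]
        have h2 : (1 : Int) + (j0 - (s + 1)) = j0 - s := by ring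
        rw [pvFold_congr _ h2.symm]
        have h3 : ((s :: j0 :: J).getLast?.getD 0) = ((j0 :: J).getLast?.getD 0) := by
          simp [List.getLast?_cons_cons]
        rw [h3]
        have h4 : s + (((t.length : Int)) + 1) = s + 1 + (t.length : Int) := by ring
        push_cast
        rw [h4, max_assoc]

lemma pvG_nonneg (bars : List Int) : ∀ (c : Int), 0 ≤ c → 0 ≤ pvG c bars := by
  induction bars with
  | nil => intro c hc; simpa [pvG] using hc
  | cons b t ih =>
    intro c hc
    by_cases hb : b = 0
    · rw [show pvG c (b :: t) = pvG (c + 1) t from by simp [pvG, hb]]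
      exact ih (c + 1) (by omega)
    · rw [show pvG c (b :: t) = max c (pvG 1 t) from by simp [pvG, hb]]
      exact le_max_of_le_right (ih 1 (by norm_num))

lemma pvAlt_eq (bars : List Int) :
    get_max_dist_alt bars = pvH 0 0 (bars.length) (pvIdx 0 bars) := by
  unfold get_max_dist_alt pvIdx
  rcases hJ : ((PySem.List.enumerate bars).filter (fun p => p.2 != 0)).map (fun p => p.1)
    with _ | ⟨i0, rest⟩
  · simp only [hJ, pvH]; ring
  · simp only [hJ, pvH]
    have h1 : (0 : Int) + (i0 - 0) = i0 := by ring
    rw [h1]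

-- ===== VERDICT (by name: the statement is the Claim_ definition above) =====
theorem get_max_dist_spec : Claim_equal_get_max_dist := by
  intro bars _
  unfold Spec_get_max_dist
  show get_max_dist bars = get_max_dist_alt bars
  unfold get_max_dist
  rw [pvA_fold bars 0 0, max_eq_right (pvG_nonneg bars 0 le_rfl), pvMain bars 0 0,
    pvAlt_eq bars]
  norm_num
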